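-- pv_equiv track=rewrite | github.com/sumi-vora/rep-theory-final | final-project/generate_ssyts.py | generate_ssyts
-- ===== SOURCE A (Python) =====
-- def entries_from_weight(weight):
--     """Convert weight vector to flat multiset list."""
--     entries = []
--     for i, count in enumerate(weight):
--         entries.extend([i + 1] * count)
--     return entries
--
-- def is_valid(tableau, row, col, val):
--     """Check if placing val at (row, col) keeps SSYT properties."""
--     if col > 0 and val < tableau[row][col - 1]:  # row must be weakly increasing
--         return False
--     if row > 0 and val <= tableau[row - 1][col]:  # column must be strictly increasing
--         return False
--     return True
--
-- def generate_ssyts(weight, shape=(3, 4)):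
--     """Generate all SSYTs of given shape and weight."""
--     total_cells = shape[0] * shape[1]
--     if sum(weight) != total_cells:
--         return []
--
--     entries = entries_from_weight(weight)
--     entries.sort()  # for lexicographic ordering
--     results = []
--
--     def backtrack(pos, tableau, remaining):
--         if pos == total_cells:
--             results.append([row[:] for row in tableau])
--             return
--         row, col = divmod(pos, shape[1])
--         used = set()
--         for i, val in enumerate(remaining):
--             if val in used:
--                 continue  # skip duplicates at this level
--             if not is_valid(tableau, row, col, val):
--                 continue
--             tableau[row][col] = val
--             backtrack(pos + 1, tableau, remaining[:i] + remaining[i+1:])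
--             tableau[row][col] = 0
--             used.add(val)
--
--     tableau = [[0 for _ in range(shape[1])] for _ in range(shape[0])]
--     backtrack(0, tableau, entries)
--     return results
-- ===== SOURCE B (Python) =====
-- def generate_ssyts(weight, shape=(3, 4)):
--     """Generate all SSYTs of given shape and weight."""
--     rows, cols = shape
--     total = rows * cols
--     if sum(weight) != total:
--         return []
--     m = len(weight)
--     # breadth-first frontier of partial fillings: (flat cell list, remaining counts)
--     frontier = [([], list(weight))]
--     for pos in range(total):
--         row, col = divmod(pos, cols)
--         new = []
--         for flat, counts in frontier:
--             lo = flat[pos - 1] if col > 0 else 1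
--             if row > 0:
--                 lo = max(lo, flat[pos - cols] + 1)
--             for v in range(lo, m + 1):
--                 if counts[v - 1] > 0:
--                     c = counts[:]
--                     c[v - 1] -= 1
--                     new.append((flat + [v], c))
--         frontier = new
--     return [[flat[r * cols:(r + 1) * cols] for r in range(rows)]
--             for flat, _ in frontier]
-- ===== Notes on version B (the rewrite author's own statement) =====
-- stated objective: alternative
-- what changed: B replaces A's recursive depth-first backtracking (mutable tableau, sorted flat multiset list, used-set, undo/restore) by an iterative breadth-first frontier: one pass over cell positions, each step expanding every partial filling (a flat cell list plus a remaining-count list) by all admissible values at once, with no recursion and no undo; rows are sliced out of the flat list at the end.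
-- outside the precondition, e.g. on generate_ssyts([-1], (1, -1)): A returns [], B returns [[[]]]
import Mathlib
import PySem

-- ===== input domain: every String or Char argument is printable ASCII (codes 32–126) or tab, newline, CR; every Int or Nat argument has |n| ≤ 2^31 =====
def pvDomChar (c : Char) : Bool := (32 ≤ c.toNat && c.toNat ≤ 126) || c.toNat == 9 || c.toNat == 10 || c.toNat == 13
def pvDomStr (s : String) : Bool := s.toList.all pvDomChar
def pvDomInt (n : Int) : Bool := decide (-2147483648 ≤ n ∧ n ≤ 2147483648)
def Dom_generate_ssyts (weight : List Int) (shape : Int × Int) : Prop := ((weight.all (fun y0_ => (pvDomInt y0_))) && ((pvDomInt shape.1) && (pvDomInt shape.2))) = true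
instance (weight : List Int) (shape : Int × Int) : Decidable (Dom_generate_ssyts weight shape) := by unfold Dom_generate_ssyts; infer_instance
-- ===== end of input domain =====

-- B replaces A's recursive depth-first backtracking (mutable tableau, sorted multiset list,
-- used-set, undo/restore) by an iterative breadth-first frontier: one pass over cell positions,
-- each step expanding every partial filling (flat cell list + remaining counts) by all
-- admissible values; rows are sliced out at the end (objective: alternative).

-- ===== PORT A =====
-- tableau[row][col] read/write; exact for 0 ≤ row < len(t), 0 ≤ col < row length (all uses in Pre_)
def pvCell (t : List (List Int)) (row col : Int) : Int :=
  PySem.List.pyGetD (PySem.List.pyGetD t row []) col 0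

def pvSetCell (t : List (List Int)) (row col v : Int) : List (List Int) :=
  t.set row.toNat ((t.getD row.toNat []).set col.toNat v)

def entries_from_weight (weight : List Int) : List Int :=
  (PySem.List.enumerate weight 0).foldl
    (fun entries ic => entries ++ List.replicate ic.2.toNat (ic.1 + 1)) []

def is_valid (tableau : List (List Int)) (row col val : Int) : Bool :=
  if col > 0 ∧ val < pvCell tableau row (col - 1) then false
  else if row > 0 ∧ val ≤ pvCell tableau (row - 1) col then false
  else true

-- the `for i, val in enumerate(remaining)` loop with the `used` set; `bt` is the call
-- backtrack(pos+1, ...) of the enclosing level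
def pvLoopA (bt : Int → List (List Int) → List Int → List (List (List Int)) → List (List (List Int)))
    (pos row col : Int) (tab : List (List Int)) (remaining : List Int) :
    Nat → List Int → PySem.Set Int → List (List (List Int)) → List (List (List Int))
  | _, [], _, res => res
  | i, val :: rest', used, res =>
    if PySem.Set.contains used val then
      pvLoopA bt pos row col tab remaining (i + 1) rest' used res
    else if is_valid tab row col val = false then
      pvLoopA bt pos row col tab remaining (i + 1) rest' used res
    else
      let tab' := pvSetCell tab row col val
      let rem' := PySem.List.slice remaining none (some (i : Int)) ++
                  PySem.List.slice remaining (some ((i : Int) + 1)) none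
      let res' := bt (pos + 1) tab' rem' res
      pvLoopA bt pos row col tab remaining (i + 1) rest' (PySem.Set.add used val) res'

-- backtrack(pos, tableau, remaining); fuel bounds the recursion depth (never exhausted: each
-- level removes one element of `remaining`)
def pvBtA (cols total : Int) :
    Nat → Int → List (List Int) → List Int → List (List (List Int)) → List (List (List Int))
  | 0, pos, tab, _, res => if pos = total then res ++ [tab] else res
  | fuel + 1, pos, tab, remaining, res =>
    if pos = total then res ++ [tab]
    else
      let row := PySem.Int.floordiv pos cols
      let col := PySem.Int.mod pos cols
      pvLoopA (pvBtA cols total fuel) pos row col tab remaining 0 remaining PySem.Set.empty res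

def generate_ssyts (weight : List Int) (shape : Int × Int) : List (List (List Int)) :=
  let total := shape.1 * shape.2
  if weight.sum ≠ total then []
  else
    let entries := entries_from_weight weight
    let entries := PySem.List.sorted entries (fun x => x) false
    let tableau := List.replicate shape.1.toNat (List.replicate shape.2.toNat 0)
    pvBtA shape.2 total ((weight.map Int.toNat).sum + 1) 0 tableau entries []

-- ===== PORT B =====
-- one BFS layer: the `for flat, counts in frontier` loop at cell position pos
def pvStepB (cols : Int) (m : Nat) (frontier : List (List Int × List Int)) (pos : Int) :
    List (List Int × List Int) :=
  let row := PySem.Int.floordiv pos cols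
  let col := PySem.Int.mod pos cols
  frontier.foldl (fun new st =>
    let lo := if col > 0 then PySem.List.pyGetD st.1 (pos - 1) 0 else 1
    let lo := if row > 0 then max lo (PySem.List.pyGetD st.1 (pos - cols) 0 + 1) else lo
    (PySem.List.pyRange lo ((m : Int) + 1) 1).foldl (fun new v =>
      if 0 < PySem.List.pyGetD st.2 (v - 1) 0 then
        new ++ [(st.1 ++ [v], st.2.set (v - 1).toNat (PySem.List.pyGetD st.2 (v - 1) 0 - 1))]
      else new) new) []

def pvFin (rows cols : Int) (flat : List Int) : List (List Int) :=
  (PySem.List.pyRange 0 rows 1).map (fun r =>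
    PySem.List.slice flat (some (r * cols)) (some ((r + 1) * cols)))

def generate_ssyts_alt (weight : List Int) (shape : Int × Int) : List (List (List Int)) :=
  if weight.sum ≠ shape.1 * shape.2 then []
  else
    ((PySem.List.pyRange 0 (shape.1 * shape.2) 1).foldl
        (pvStepB shape.2 weight.length) [([], weight)]).map
      (fun st => pvFin shape.1 shape.2 st.1)

-- ===== PRECONDITION & SPEC =====
-- Pre_ restricts shapes to the natural domain once the weight sum matches a nonzero cell count:
-- outside it a negative shape dimension makes A raise IndexError (when some weight is positive)
-- or fall through to an empty result (when none is), while B's frontier pass returns a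
-- degenerate tableau there.
def Pre_generate_ssyts (weight : List Int) (shape : Int × Int) : Prop :=
  weight.sum = shape.1 * shape.2 → shape.1 * shape.2 = 0 ∨ (0 ≤ shape.1 ∧ 0 ≤ shape.2)
instance (weight : List Int) (shape : Int × Int) : Decidable (Pre_generate_ssyts weight shape) := by
  unfold Pre_generate_ssyts; infer_instance

def pvWitness_generate_ssyts : List Int × (Int × Int) := ([2, 1, 1], (2, 2))

def Spec_generate_ssyts (weight : List Int) (shape : Int × Int) (out : List (List (List Int))) : Prop := out = generate_ssyts_alt weight shape
instance (weight : List Int) (shape : Int × Int) (out : List (List (List Int))) : Decidable (Spec_generate_ssyts weight shape out) := by unfold Spec_generate_ssyts; infer_instance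

-- ===== CLAIM (what is proved, stated in full; the proofs are below) =====
def Claim_equal_generate_ssyts : Prop := ∀ (weight : List Int) (shape : Int × Int), Dom_generate_ssyts weight shape → Pre_generate_ssyts weight shape → Spec_generate_ssyts weight shape (generate_ssyts weight shape)

-- ===== LEMMAS AND PROOFS =====

-- proof-side intermediate: A's depth-first search re-expressed over a value-count array
-- (counts.getD v = multiplicity of value v; index 0 is a dummy)
def pvBtB (cols total : Int) (m : Nat) :
    Nat → Int → List (List Int) → List Int → List (List (List Int)) → List (List (List Int))
  | 0, pos, tab, _, res => if pos = total then res ++ [tab] else res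
  | fuel + 1, pos, tab, counts, res =>
    if pos = total then res ++ [tab]
    else
      let row := PySem.Int.floordiv pos cols
      let col := PySem.Int.mod pos cols
      let lo := if col > 0 then pvCell tab row (col - 1) else 1
      let lo := if row > 0 then max lo (pvCell tab (row - 1) col + 1) else lo
      (PySem.List.pyRange 1 ((m : Int) + 1) 1).foldl (fun res v =>
        if 0 < PySem.List.pyGetD counts v 0 ∧ lo ≤ v then
          pvBtB cols total m fuel (pos + 1) (pvSetCell tab row col v)
            (counts.set v.toNat (PySem.List.pyGetD counts v 0 - 1)) res
        else res) res

-- the canonical sorted flat multiset of the values w..w+k-1, with multiplicities read off `counts`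
def canonFrom (counts : List Int) (w k : Nat) : List Int :=
  (List.range' w k).flatMap (fun v => List.replicate (counts.getD v 0).toNat (v : Int))

lemma canonFrom_zero (counts : List Int) (w : Nat) : canonFrom counts w 0 = [] := rfl

lemma canonFrom_succ (counts : List Int) (w k : Nat) :
    canonFrom counts w (k + 1)
      = List.replicate (counts.getD w 0).toNat (w : Int) ++ canonFrom counts (w + 1) k := by
  simp [canonFrom, List.range'_succ]

lemma canonFrom_split (counts : List Int) (w p q : Nat) :
    canonFrom counts w (p + q) = canonFrom counts w p ++ canonFrom counts (w + p) q := by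
  unfold canonFrom
  rw [← List.range'_append_1, List.flatMap_append]

lemma getD_set_self (l : List Int) (n : Nat) (a : Int) (h : n < l.length) :
    (l.set n a).getD n 0 = a := by
  simp [List.getD_eq_getElem?_getD, h]

lemma getD_set_ne (l : List Int) (n u : Nat) (a : Int) (h : u ≠ n) :
    (l.set n a).getD u 0 = l.getD u 0 := by
  simp [List.getD_eq_getElem?_getD, List.getElem?_set_ne (Ne.symm h)]

lemma getD_replicate_zero (n k : Nat) : (List.replicate n (0 : Int)).getD k 0 = 0 := by
  rw [List.getD_eq_getElem?_getD, List.getElem?_replicate]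
  split <;> rfl

lemma mem_canonFrom_ge (counts : List Int) :
    ∀ (k w : Nat) (x : Int), x ∈ canonFrom counts w k → (w : Int) ≤ x := by
  intro k
  induction k with
  | zero => intro w x hx; simp [canonFrom_zero] at hx
  | succ k ih =>
    intro w x hx
    rw [canonFrom_succ] at hx
    rcases List.mem_append.1 hx with h | h
    · rcases List.eq_of_mem_replicate h with rfl; exact le_refl _
    · have := ih (w + 1) x h
      push_cast at this ⊢
      omega

lemma canonFrom_pairwise (counts : List Int) :
    ∀ (k w : Nat), (canonFrom counts w k).Pairwise (fun a b : Int => a ≤ b) := by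
  intro k
  induction k with
  | zero => intro w; simp [canonFrom_zero]
  | succ k ih =>
    intro w
    rw [canonFrom_succ]
    refine List.pairwise_append.2 ⟨List.pairwise_replicate.2 (Or.inr (le_refl _)), ih (w + 1), ?_⟩
    intro a ha b hb
    rcases List.eq_of_mem_replicate ha with rfl
    have := mem_canonFrom_ge counts k (w + 1) b hb
    push_cast at this ⊢
    omega

lemma canonFrom_set_outside (counts : List Int) (v : Nat) (x : Int) :
    ∀ (k w : Nat), (v < w ∨ w + k ≤ v) →
      canonFrom (counts.set v x) w k = canonFrom counts w k := by
  intro k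
  induction k with
  | zero => intro w _; rfl
  | succ k ih =>
    intro w hv
    rw [canonFrom_succ, canonFrom_succ, getD_set_ne counts v w x (by omega), ih (w + 1) (by omega)]

lemma canonFrom_length_succ (counts : List Int) (w : Nat) :
    (canonFrom counts 0 (w + 1)).length
      = (canonFrom counts 0 w).length + (counts.getD w 0).toNat := by
  rw [canonFrom_split counts 0 w 1]
  simp [canonFrom_succ, canonFrom_zero]

lemma contains_iff_mem_int (s : PySem.Set Int) (x : Int) :
    PySem.Set.contains s x = true ↔ x ∈ s := by
  simp [PySem.Set.contains]

-- skipping a run of equal values in A's inner loop (already used, or invalid at this cell)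
lemma pvLoopA_skip (bt : Int → List (List Int) → List Int → List (List (List Int)) → List (List (List Int)))
    (pos row col : Int) (tab : List (List Int))
    (remaining : List Int) (val : Int) (used : PySem.Set Int)
    (h : PySem.Set.contains used val = true ∨ is_valid tab row col val = false) :
    ∀ (j : Nat) (rest : List Int) (i : Nat) (res : List (List (List Int))),
      pvLoopA bt pos row col tab remaining i (List.replicate j val ++ rest) used res
        = pvLoopA bt pos row col tab remaining (i + j) rest used res := by
  intro j
  induction j with
  | zero => intro rest i res; simp
  | succ j ih =>
    intro rest i res
    rw [List.replicate_succ, List.cons_append, pvLoopA]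
    by_cases hc : PySem.Set.contains used val = true
    · rw [if_pos hc, ih]
      have e : i + 1 + j = i + (j + 1) := by omega
      rw [e]
    · rw [if_neg hc]
      rcases h with h | h
      · exact absurd h hc
      · rw [if_pos h, ih]
        have e : i + 1 + j = i + (j + 1) := by omega
        rw [e]

-- A's inner loop over the canonical multiset = one fold over the distinct values w..w+k-1
lemma pvLoopA_canon (bt : Int → List (List Int) → List Int → List (List (List Int)) → List (List (List Int)))
    (pos row col : Int) (tab : List (List Int))
    (m : Nat) (counts : List Int) :
    ∀ (k w : Nat) (used : PySem.Set Int) (res : List (List (List Int))),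
      w + k = m + 1 →
      (∀ u ∈ used, u < (w : Int)) →
      pvLoopA bt pos row col tab (canonFrom counts 0 (m + 1))
          (canonFrom counts 0 w).length (canonFrom counts w k) used res
        = (List.range' w k).foldl (fun res v =>
            if 0 < counts.getD v 0 ∧ is_valid tab row col (v : Int) = true then
              bt (pos + 1) (pvSetCell tab row col (v : Int))
                (canonFrom (counts.set v (counts.getD v 0 - 1)) 0 (m + 1)) res
            else res) res := by
  intro k
  induction k with
  | zero =>
    intro w used res hw hu
    rw [canonFrom_zero]
    simp [pvLoopA]
  | succ k ih =>
    intro w used res hw hu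
    rw [List.range'_succ, List.foldl_cons]
    by_cases hc : 0 < counts.getD w 0
    · -- nonempty block of value w
      have hwlen : w < counts.length := by
        by_contra hlen
        have h2 : counts.getD w 0 = 0 := by
          rw [List.getD_eq_getElem?_getD, List.getElem?_eq_none (by omega)]; rfl
        omega
      obtain ⟨cn, hcn⟩ : ∃ cn, (counts.getD w 0).toNat = cn + 1 :=
        ⟨(counts.getD w 0).toNat - 1, by omega⟩
      have hcont : ¬ PySem.Set.contains used ((w : Nat) : Int) = true := by
        intro hmem
        have := hu _ ((contains_iff_mem_int used _).1 hmem)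
        omega
      have hrest : canonFrom counts w (k + 1)
          = ((w : Nat) : Int) :: (List.replicate cn ((w : Nat) : Int) ++ canonFrom counts (w + 1) k) := by
        rw [canonFrom_succ, hcn, List.replicate_succ]
        simp
      have hsplit : canonFrom counts 0 (m + 1)
          = canonFrom counts 0 w
            ++ (((w : Nat) : Int) :: (List.replicate cn ((w : Nat) : Int) ++ canonFrom counts (w + 1) k)) := by
        rw [show m + 1 = w + (k + 1) by omega, canonFrom_split counts 0 w (k + 1)]
        simp only [Nat.zero_add]
        rw [hrest]
      have htake : PySem.List.slice (canonFrom counts 0 (m + 1)) none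
            (some (((canonFrom counts 0 w).length : Nat) : Int)) = canonFrom counts 0 w := by
        rw [PySem.List.slice_to_natCast, hsplit, List.take_left]
      have hdrop : PySem.List.slice (canonFrom counts 0 (m + 1))
            (some ((((canonFrom counts 0 w).length : Nat) : Int) + 1)) none
          = List.replicate cn ((w : Nat) : Int) ++ canonFrom counts (w + 1) k := by
        have e1 : (((canonFrom counts 0 w).length : Nat) : Int) + 1
            = (((canonFrom counts 0 w).length + 1 : Nat) : Int) := by push_cast; ring
        rw [e1, PySem.List.slice_from_natCast, hsplit]
        rw [show canonFrom counts 0 w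
              ++ (((w : Nat) : Int) :: (List.replicate cn ((w : Nat) : Int) ++ canonFrom counts (w + 1) k))
            = (canonFrom counts 0 w ++ [((w : Nat) : Int)])
              ++ (List.replicate cn ((w : Nat) : Int) ++ canonFrom counts (w + 1) k) by simp]
        rw [show (canonFrom counts 0 w).length + 1
              = (canonFrom counts 0 w ++ [((w : Nat) : Int)]).length by simp]
        exact List.drop_left
      have hdec : canonFrom counts 0 w
            ++ (List.replicate cn ((w : Nat) : Int) ++ canonFrom counts (w + 1) k)
          = canonFrom (counts.set w (counts.getD w 0 - 1)) 0 (m + 1) := by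
        rw [show m + 1 = w + (1 + k) by omega, canonFrom_split _ 0 w (1 + k)]
        simp only [Nat.zero_add]
        rw [canonFrom_split _ w 1 k,
            canonFrom_set_outside counts w _ w 0 (by omega),
            canonFrom_set_outside counts w _ k (w + 1) (by omega),
            canonFrom_succ, canonFrom_zero, List.append_nil,
            getD_set_self counts w _ hwlen,
            show (counts.getD w 0 - 1).toNat = cn by omega]
      have hilen : (canonFrom counts 0 w).length + 1 + cn = (canonFrom counts 0 (w + 1)).length := by
        rw [canonFrom_length_succ, hcn]
        omega
      have hu2 : ∀ u ∈ used, u < ((w + 1 : Nat) : Int) := fun u huu => by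
        have := hu u huu; push_cast at this ⊢; omega
      rw [hrest, pvLoopA, if_neg hcont]
      by_cases hv : is_valid tab row col ((w : Nat) : Int) = true
      · -- valid: one recursive call, then the duplicates are skipped via `used`
        have hu1 : ∀ u ∈ PySem.Set.add used ((w : Nat) : Int), u < ((w + 1 : Nat) : Int) := by
          intro u huu
          rcases (PySem.Set.mem_add used ((w : Nat) : Int) u).1 huu with h | h
          · have := hu u h; push_cast at this ⊢; omega
          · subst h; push_cast; omega
        rw [if_neg (by simp [hv]), htake, hdrop, hdec,
            pvLoopA_skip bt pos row col tab _ _ _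
              (Or.inl ((contains_iff_mem_int _ _).2
                ((PySem.Set.mem_add used ((w : Nat) : Int) ((w : Nat) : Int)).2 (Or.inr rfl)))),
            hilen, if_pos ⟨hc, hv⟩]
        exact ih (w + 1) _ _ (by omega) hu1
      · -- invalid: the whole block is skipped
        have hv' : is_valid tab row col ((w : Nat) : Int) = false := by
          revert hv; cases is_valid tab row col ((w : Nat) : Int) <;> simp
        rw [if_pos hv',
            pvLoopA_skip bt pos row col tab _ _ _ (Or.inr hv'),
            hilen, if_neg (by rintro ⟨-, h⟩; rw [hv'] at h; cases h)]
        exact ih (w + 1) used res (by omega) hu2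
    · -- empty block of value w
      have h0 : (counts.getD w 0).toNat = 0 := by omega
      have hrest0 : canonFrom counts w (k + 1) = canonFrom counts (w + 1) k := by
        rw [canonFrom_succ, h0]
        simp
      have hl : (canonFrom counts 0 w).length = (canonFrom counts 0 (w + 1)).length := by
        rw [canonFrom_length_succ, h0]
        omega
      rw [hrest0, if_neg (fun h => hc h.1), hl]
      exact ih (w + 1) used res (by omega) (fun u huu => by
        have := hu u huu; push_cast at this ⊢; omega)

-- A's validity test is exactly "v is at least the lower bound from the two neighbours"
lemma is_valid_iff_lo (tab : List (List Int)) (row col v : Int) (hv : 1 ≤ v) :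
    is_valid tab row col v = true ↔
      (if row > 0 then
        max (if col > 0 then pvCell tab row (col - 1) else 1) (pvCell tab (row - 1) col + 1)
       else if col > 0 then pvCell tab row (col - 1) else 1) ≤ v := by
  unfold is_valid
  split_ifs <;> simp_all

-- A's backtracking over the canonical multiset list equals the count-array search pvBtB
lemma pvBtA_eq_pvBtB (cols total : Int) (m : Nat) :
    ∀ (fuel : Nat) (pos : Int) (tab : List (List Int)) (counts : List Int)
      (res : List (List (List Int))),
      counts.length = m + 1 → counts.getD 0 0 ≤ 0 →
      pvBtA cols total fuel pos tab (canonFrom counts 0 (m + 1)) res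
        = pvBtB cols total m fuel pos tab counts res := by
  intro fuel
  induction fuel with
  | zero =>
    intro pos tab counts res _ _
    rw [pvBtA, pvBtB]
  | succ fuel ih =>
    intro pos tab counts res hlen h0
    rw [pvBtA, pvBtB]
    by_cases hp : pos = total
    · rw [if_pos hp, if_pos hp]
    · rw [if_neg hp, if_neg hp]
      have hloop := pvLoopA_canon (pvBtA cols total fuel) pos (PySem.Int.floordiv pos cols)
        (PySem.Int.mod pos cols) tab m counts (m + 1) 0 PySem.Set.empty res (by omega)
        (by intro u hu; simp [PySem.Set.empty] at hu)
      simp only [canonFrom_zero, List.length_nil] at hloop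
      rw [hloop]
      -- peel off v = 0 (its count is ≤ 0) and align the two folds over the values 1..m
      rw [show List.range' 0 (m + 1) = 0 :: List.range' 1 m by rw [List.range'_succ]]
      rw [List.foldl_cons, if_neg (by rintro ⟨h, -⟩; omega)]
      rw [List.range'_eq_map_range, List.foldl_map]
      rw [show PySem.List.pyRange 1 ((m : Int) + 1) 1
            = (List.range m).map (fun k : Nat => 1 + (k : Int)) by
          rw [PySem.List.pyRange_one, show (m : Int) + 1 - 1 = ((m : Nat) : Int) by ring,
              Int.toNat_natCast]]
      rw [List.foldl_map]
      apply PySem.List.foldl_congr_mem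
      intro acc x hx
      have hxm : x < m := List.mem_range.1 hx
      have hcast : ((1 + x : Nat) : Int) = 1 + (x : Int) := by push_cast; ring
      have hget : PySem.List.pyGetD counts (1 + (x : Int)) 0 = counts.getD (1 + x) 0 := by
        rw [← hcast, PySem.List.pyGetD_natCast]
      have htn : (1 + (x : Int)).toNat = 1 + x := by omega
      rw [hget, htn, hcast]
      by_cases hcond : 0 < counts.getD (1 + x) 0 ∧ is_valid tab (PySem.Int.floordiv pos cols)
          (PySem.Int.mod pos cols) (1 + (x : Int)) = true
      · rw [if_pos hcond,
            if_pos ⟨hcond.1,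
              (is_valid_iff_lo tab (PySem.Int.floordiv pos cols) (PySem.Int.mod pos cols)
                (1 + (x : Int)) (by omega)).1 hcond.2⟩]
        exact ih (pos + 1) _ _ acc (by rw [List.length_set, hlen])
          (by rw [getD_set_ne _ _ _ _ (by omega)]; exact h0)
      · rw [if_neg hcond,
            if_neg (fun hb => hcond ⟨hb.1,
              (is_valid_iff_lo tab (PySem.Int.floordiv pos cols) (PySem.Int.mod pos cols)
                (1 + (x : Int)) (by omega)).2 hb.2⟩)]

lemma entries_eq_flatMap (weight : List Int) :
    entries_from_weight weight
      = (PySem.List.enumerate weight 0).flatMap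
          (fun ic => List.replicate ic.2.toNat (ic.1 + 1)) := by
  unfold entries_from_weight
  rw [PySem.List.foldl_append_eq_flatMap (fun ic => List.replicate ic.2.toNat (ic.1 + 1))
        (PySem.List.enumerate weight 0) []]
  rfl

lemma canonView :
    ∀ (ws : List Int) (a : Nat) (counts : List Int),
      (∀ j, j < ws.length → counts.getD (a + 1 + j) 0 = ws.getD j 0) →
      canonFrom counts (a + 1) ws.length
        = (PySem.List.enumerate ws (a : Int)).flatMap
            (fun ic => List.replicate ic.2.toNat (ic.1 + 1)) := by
  intro ws
  induction ws with
  | nil => intro a counts _; rfl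
  | cons w ws ih =>
    intro a counts h
    rw [show (w :: ws).length = ws.length + 1 from rfl, canonFrom_succ,
        PySem.List.enumerate_cons, List.flatMap_cons]
    have h0 : counts.getD (a + 1) 0 = w := by simpa using h 0 (by simp)
    have e1 : ((a + 1 : Nat) : Int) = (a : Int) + 1 := by push_cast; ring
    rw [h0, e1]
    congr 1
    rw [show (a : Int) + 1 = ((a + 1 : Nat) : Int) by push_cast; ring]
    exact ih (a + 1) counts (fun j hj => by
      have := h (j + 1) (by simpa using Nat.succ_lt_succ hj)
      simpa [show a + 1 + (j + 1) = a + 1 + 1 + j by omega] using this)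


-- ===== B-side machinery: frontier layers as flatMap, and the flat-list view of the tableau =====

-- generic shapes of the conditional-append loops
lemma foldl_ite_skip {α β : Type} (P : α → Prop) [DecidablePred P] (g : β → α → β) :
    ∀ (l : List α) (res : β), (∀ v ∈ l, ¬ P v) →
      l.foldl (fun r v => if P v then g r v else r) res = res := by
  intro l
  induction l with
  | nil => intro res _; rfl
  | cons v l ih =>
    intro res h
    rw [List.foldl_cons, if_neg (h v (List.mem_cons_self ..))]
    exact ih res (fun u hu => h u (List.mem_cons_of_mem _ hu))

lemma foldl_ite_snoc {α β : Type} (P : α → Prop) [DecidablePred P] (f : α → β) :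
    ∀ (l : List α) (acc : List β),
      l.foldl (fun a v => if P v then a ++ [f v] else a) acc
        = acc ++ l.foldl (fun a v => if P v then a ++ [f v] else a) [] := by
  intro l
  induction l with
  | nil => intro acc; simp
  | cons v l ih =>
    intro acc
    rw [List.foldl_cons, List.foldl_cons, ih, ih (if P v then [] ++ [f v] else [])]
    split_ifs <;> simp

lemma foldl_ite_flatMap {α β γ : Type} (P : α → Prop) [DecidablePred P] (f : α → β)
    (g : β → List γ) :
    ∀ (l : List α) (res : List γ),
      l.foldl (fun r v => if P v then r ++ g (f v) else r) res
        = res ++ (l.foldl (fun a v => if P v then a ++ [f v] else a) []).flatMap g := by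
  intro l
  induction l with
  | nil => intro res; simp
  | cons v l ih =>
    intro res
    rw [List.foldl_cons, List.foldl_cons, ih]
    split_ifs
    · rw [foldl_ite_snoc P f l ([] ++ [f v])]
      simp
    · simp

-- the flat list of already-filled cells, padded with the 0 placeholders, chunked into rows
def pvPad (N : Nat) (flat : List Int) : List Int := flat ++ List.replicate (N - flat.length) 0

def tabOf (R C : Nat) (flat : List Int) : List (List Int) :=
  (List.range R).map (fun r => (List.range C).map (fun c => (pvPad (R * C) flat).getD (r * C + c) 0))

lemma getD_map_range' {β : Type} (n k : Nat) (g : Nat → β) (d : β) (h : k < n) :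
    ((List.range n).map g).getD k d = g k := by
  rw [List.getD_eq_getElem?_getD, List.getElem?_map, List.getElem?_range h]
  rfl

lemma set_map_range {β : Type} (n c : Nat) (g : Nat → β) (v : β) :
    ((List.range n).map g).set c v = (List.range n).map (fun i => if i = c then v else g i) := by
  apply List.ext_getElem
  · simp
  · intro i h1 h2
    simp only [List.length_set, List.length_map, List.length_range] at h1
    rw [List.getElem_set]
    by_cases hic : c = i
    · subst hic
      simp
    · have h2 : i ≠ c := fun h => hic h.symm
      simp [hic, h2]

lemma pvPad_length (N : Nat) (flat : List Int) (h : flat.length ≤ N) :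
    (pvPad N flat).length = N := by
  unfold pvPad; simp; omega

lemma pvPad_getD_lt (N : Nat) (flat : List Int) (i : Nat) (h : i < flat.length) :
    (pvPad N flat).getD i 0 = flat.getD i 0 := by
  unfold pvPad
  rw [List.getD_eq_getElem?_getD, List.getElem?_append_left h, ← List.getD_eq_getElem?_getD]

lemma pvPad_snoc (N : Nat) (flat : List Int) (v : Int) (h : flat.length < N) :
    pvPad N (flat ++ [v]) = (pvPad N flat).set flat.length v := by
  unfold pvPad
  rw [show N - flat.length = (N - (flat ++ [v]).length) + 1 by simp; omega, List.replicate_succ]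
  rw [List.set_append_right _ _ (le_refl flat.length)]
  simp

lemma pvPad_full (N : Nat) (flat : List Int) (h : flat.length = N) :
    pvPad N flat = flat := by
  unfold pvPad; rw [h]; simp
lemma tabOf_cell (R C : Nat) (flat : List Int) (r c : Nat) (hr : r < R) (hc : c < C) :
    pvCell (tabOf R C flat) (r : Int) (c : Int) = (pvPad (R * C) flat).getD (r * C + c) 0 := by
  unfold pvCell tabOf
  rw [PySem.List.pyGetD_natCast, PySem.List.pyGetD_natCast, getD_map_range' R r _ _ hr,
      getD_map_range' C c _ _ hc]

lemma tabOf_set (R C : Nat) (flat : List Int) (r c : Nat) (v : Int)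
    (hr : r < R) (hc : c < C) (hlen : flat.length = r * C + c) :
    pvSetCell (tabOf R C flat) (r : Int) (c : Int) v = tabOf R C (flat ++ [v]) := by
  have hrow : (r + 1) * C ≤ R * C := Nat.mul_le_mul_right C (by omega)
  have hpos : r * C + c < R * C := by
    have : (r + 1) * C = r * C + C := by ring
    omega
  have hpadlen : (pvPad (R * C) flat).length = R * C := pvPad_length _ _ (by omega)
  unfold pvSetCell
  rw [Int.toNat_natCast, Int.toNat_natCast]
  unfold tabOf
  rw [pvPad_snoc (R * C) flat v (by omega), getD_map_range' R r _ _ hr, set_map_range,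
      set_map_range]
  apply List.map_congr_left
  intro r' hr'
  have hr'R : r' < R := List.mem_range.1 hr'
  by_cases hrr : r' = r
  · subst hrr
    rw [if_pos rfl]
    apply List.map_congr_left
    intro i hi
    have hiC : i < C := List.mem_range.1 hi
    by_cases hic : i = c
    · subst hic
      rw [if_pos rfl, hlen, getD_set_self _ _ _ (by omega)]
    · rw [if_neg hic, hlen, getD_set_ne _ _ _ _ (by omega)]
  · rw [if_neg hrr]
    apply List.map_congr_left
    intro i hi
    have hiC : i < C := List.mem_range.1 hi
    have hne : r' * C + i ≠ flat.length := by
      rw [hlen]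
      rcases Nat.lt_or_ge r' r with h | h
      · have h1 : (r' + 1) * C ≤ r * C := Nat.mul_le_mul_right C (by omega)
        have : (r' + 1) * C = r' * C + C := by ring
        omega
      · have hgt : r < r' := by omega
        have h1 : (r + 1) * C ≤ r' * C := Nat.mul_le_mul_right C (by omega)
        have : (r + 1) * C = r * C + C := by ring
        omega
    rw [getD_set_ne _ _ _ _ hne]

lemma tabOf_fin (R C : Nat) (flat : List Int) (hlen : flat.length = R * C) :
    tabOf R C flat = pvFin (R : Int) (C : Int) flat := by
  unfold tabOf pvFin
  rw [PySem.List.pyRange_one 0 (R : Int),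
      show ((R : Int) - 0).toNat = R by omega, List.map_map]
  apply List.map_congr_left
  intro r hr
  have hrR : r < R := List.mem_range.1 hr
  have hrow : (r + 1) * C ≤ R * C := Nat.mul_le_mul_right C (by omega)
  have hrC : (r + 1) * C = r * C + C := by ring
  simp only [Function.comp]
  rw [show (0 + (r : Int)) * (C : Int) = ((r * C : Nat) : Int) by push_cast; ring,
      show (0 + (r : Int) + 1) * (C : Int) = ((r * C + C : Nat) : Int) by push_cast; ring,
      PySem.List.slice_natCast, show r * C + C - r * C = C by omega,
      pvPad_full _ _ hlen]
  apply List.ext_getElem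
  · simp
    omega
  · intro i h1 h2
    simp only [List.length_map, List.length_range] at h1
    rw [List.getElem_map, List.getElem_range, List.getElem_take, List.getElem_drop,
        List.getD_eq_getElem?_getD, List.getElem?_eq_getElem (by omega)]
    rfl

lemma tabOf_nil (R C : Nat) :
    tabOf R C [] = List.replicate R (List.replicate C 0) := by
  unfold tabOf pvPad
  apply List.ext_getElem
  · simp
  · intro r h1 h2
    simp only [List.length_map, List.length_range] at h1
    rw [List.getElem_map, List.getElem_range, List.getElem_replicate]
    apply List.ext_getElem
    · simp
    · intro c g1 g2
      simp only [List.length_map, List.length_range] at g1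
      rw [List.getElem_map, List.getElem_range, List.getElem_replicate, List.nil_append,
          getD_replicate_zero]
-- the lower bound B computes at cell position pos (flat = the pos cells filled so far)
def pvLo (C pos : Nat) (flat : List Int) : Int :=
  if 0 < pos / C then
    max (if 0 < pos % C then flat.getD (pos - 1) 0 else 1) (flat.getD (pos - C) 0 + 1)
  else
    if 0 < pos % C then flat.getD (pos - 1) 0 else 1

lemma getD_mem_of_lt (flat : List Int) (i : Nat) (h : i < flat.length) :
    flat.getD i 0 ∈ flat := by
  rw [List.getD_eq_getElem?_getD, List.getElem?_eq_getElem h]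
  exact List.getElem_mem h

lemma pvLo_ge_one (C pos : Nat) (flat : List Int) (hC : 0 < C)
    (hflen : flat.length = pos) (hflat : ∀ x ∈ flat, 1 ≤ x) : 1 ≤ pvLo C pos flat := by
  have h1 : 0 < pos % C → 1 ≤ flat.getD (pos - 1) 0 := by
    intro h
    have hp : 0 < pos := by
      rcases Nat.eq_zero_or_pos pos with h0 | h0
      · rw [h0] at h; simp at h
      · exact h0
    exact hflat _ (getD_mem_of_lt flat (pos - 1) (by omega))
  have h2 : 0 < pos / C → 1 ≤ flat.getD (pos - C) 0 + 1 := by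
    intro h
    have hle : C ≤ pos := by
      by_contra hcon
      rw [Nat.div_eq_of_lt (by omega)] at h
      omega
    have := hflat _ (getD_mem_of_lt flat (pos - C) (by omega))
    omega
  unfold pvLo
  split_ifs with hdiv hmod hmod
  · exact le_max_of_le_right (h2 hdiv)
  · exact le_max_of_le_right (h2 hdiv)
  · exact h1 hmod
  · exact le_refl 1

-- the expansion of one partial filling at position pos (the two inner loops of pvStepB,
-- started from the empty list)
def pvExpand (cols : Int) (m : Nat) (pos : Int) (st : List Int × List Int) :
    List (List Int × List Int) :=
  let row := PySem.Int.floordiv pos cols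
  let col := PySem.Int.mod pos cols
  let lo := if col > 0 then PySem.List.pyGetD st.1 (pos - 1) 0 else 1
  let lo := if row > 0 then max lo (PySem.List.pyGetD st.1 (pos - cols) 0 + 1) else lo
  (PySem.List.pyRange lo ((m : Int) + 1) 1).foldl (fun new v =>
    if 0 < PySem.List.pyGetD st.2 (v - 1) 0 then
      new ++ [(st.1 ++ [v], st.2.set (v - 1).toNat (PySem.List.pyGetD st.2 (v - 1) 0 - 1))]
    else new) []

lemma pvExpand_spec (C : Nat) (m pos : Nat) (flat cs : List Int) :
    pvExpand (C : Int) m ((pos : Nat) : Int) (flat, cs)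
      = (PySem.List.pyRange (pvLo C pos flat) ((m : Int) + 1) 1).foldl (fun new v =>
          if 0 < PySem.List.pyGetD cs (v - 1) 0 then
            new ++ [(flat ++ [v], cs.set (v - 1).toNat (PySem.List.pyGetD cs (v - 1) 0 - 1))]
          else new) [] := by
  unfold pvExpand pvLo
  simp only [PySem.Int.floordiv_natCast, PySem.Int.mod_natCast]
  have hread1 : 0 < pos % C → PySem.List.pyGetD flat ((pos : Int) - 1) 0 = flat.getD (pos - 1) 0 := by
    intro hm
    have hp : 0 < pos := by
      rcases Nat.eq_zero_or_pos pos with h0 | h0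
      · rw [h0] at hm; simp at hm
      · exact h0
    rw [show (pos : Int) - 1 = ((pos - 1 : Nat) : Int) by omega, PySem.List.pyGetD_natCast]
  have hread2 : 0 < pos / C → PySem.List.pyGetD flat ((pos : Int) - (C : Int)) 0 = flat.getD (pos - C) 0 := by
    intro hd
    have hle : C ≤ pos := by
      by_contra hcon
      rw [Nat.div_eq_of_lt (by omega)] at hd
      omega
    rw [show (pos : Int) - (C : Int) = ((pos - C : Nat) : Int) by omega, PySem.List.pyGetD_natCast]
  by_cases hd : 0 < pos / C
  · rw [if_pos (by exact_mod_cast hd : ((pos / C : Nat) : Int) > 0), if_pos hd, hread2 hd]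
    by_cases hm : 0 < pos % C
    · rw [if_pos (by exact_mod_cast hm : ((pos % C : Nat) : Int) > 0), if_pos hm, hread1 hm]
    · rw [if_neg (by omega : ¬ ((pos % C : Nat) : Int) > 0), if_neg hm]
  · rw [if_neg (by omega : ¬ ((pos / C : Nat) : Int) > 0), if_neg hd]
    by_cases hm : 0 < pos % C
    · rw [if_pos (by exact_mod_cast hm : ((pos % C : Nat) : Int) > 0), if_pos hm, hread1 hm]
    · rw [if_neg (by omega : ¬ ((pos % C : Nat) : Int) > 0), if_neg hm]

lemma foldl_body_flatMap {α β : Type} (body : List β → α → List β) (e : α → List β)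
    (h : ∀ acc st, body acc st = acc ++ e st) :
    ∀ (F : List α) (acc : List β), F.foldl body acc = acc ++ F.flatMap e := by
  intro F
  induction F with
  | nil => intro acc; simp
  | cons st F ih =>
    intro acc
    rw [List.foldl_cons, h acc st, ih, List.flatMap_cons, List.append_assoc]

def pvDfsB (rows cols : Int) (m : Nat) : List Int → List Int × List Int → List (List (List Int))
  | [], st => [pvFin rows cols st.1]
  | p :: ps, st => (pvExpand cols m p st).flatMap (pvDfsB rows cols m ps)

lemma pvStepB_eq (cols : Int) (m : Nat) (F : List (List Int × List Int)) (pos : Int) :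
    pvStepB cols m F pos = F.flatMap (pvExpand cols m pos) := by
  unfold pvStepB
  exact foldl_body_flatMap _ (pvExpand cols m pos)
    (fun acc st => foldl_ite_snoc
      (fun v => 0 < PySem.List.pyGetD st.2 (v - 1) 0)
      (fun v => (st.1 ++ [v], st.2.set (v - 1).toNat (PySem.List.pyGetD st.2 (v - 1) 0 - 1)))
      _ acc) F []

lemma bfs_eq (rows cols : Int) (m : Nat) :
    ∀ (ps : List Int) (F : List (List Int × List Int)),
      (ps.foldl (pvStepB cols m) F).map (fun st => pvFin rows cols st.1)
        = F.flatMap (pvDfsB rows cols m ps) := by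
  intro ps
  induction ps with
  | nil =>
    intro F
    simp only [List.foldl_nil, pvDfsB]
    induction F with
    | nil => rfl
    | cons a F ihF => simp [ihF]
  | cons p ps ih =>
    intro F
    rw [List.foldl_cons, ih, pvStepB_eq, List.flatMap_assoc]
    rfl
-- the heart of the file: A's depth-first search (count-array form) produces, for each cell
-- position, exactly the concatenation of the breadth-first expansions of B
lemma dfs_eq_bfs (R C : Nat) (hC : 0 < C) (m : Nat) :
    ∀ (fuel : Nat) (pos : Nat) (flat cs : List Int) (res : List (List (List Int))),
      flat.length = pos → pos ≤ R * C → R * C - pos ≤ fuel → (∀ x ∈ flat, 1 ≤ x) →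
      pvBtB (C : Int) ((R * C : Nat) : Int) m fuel (pos : Int) (tabOf R C flat) (0 :: cs) res
        = res ++ pvDfsB (R : Int) (C : Int) m
            (PySem.List.pyRange (pos : Int) ((R * C : Nat) : Int) 1) (flat, cs) := by
  intro fuel
  induction fuel with
  | zero =>
    intro pos flat cs res hflen hle hfuel _
    have hpt : pos = R * C := by omega
    subst hpt
    rw [pvBtB, if_pos rfl, PySem.List.pyRange_one_eq_nil (le_refl _), pvDfsB,
        tabOf_fin R C flat hflen]
  | succ fuel ih =>
    intro pos flat cs res hflen hle hfuel hflat
    by_cases hpt : pos = R * C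
    · subst hpt
      rw [pvBtB, if_pos rfl, PySem.List.pyRange_one_eq_nil (le_refl _), pvDfsB,
          tabOf_fin R C flat hflen]
    · have hlt : pos < R * C := by omega
      have hr : pos / C < R := (Nat.div_lt_iff_lt_mul hC).2 hlt
      have hc : pos % C < C := Nat.mod_lt pos hC
      have hdm' : (pos / C) * C + pos % C = pos := by
        rw [Nat.mul_comm]
        exact Nat.div_add_mod pos C
      have hig : ¬ ((pos : Int) = ((R * C : Nat) : Int)) := by exact_mod_cast hpt
      rw [pvBtB, if_neg hig,
          PySem.List.pyRange_one_cons
            (show (pos : Int) < ((R * C : Nat) : Int) by exact_mod_cast hlt), pvDfsB,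
          pvExpand_spec C m pos flat cs]
      simp only [PySem.Int.floordiv_natCast, PySem.Int.mod_natCast]
      have hcell1 : 0 < pos % C →
          pvCell (tabOf R C flat) ((pos / C : Nat) : Int) (((pos % C : Nat) : Int) - 1)
            = flat.getD (pos - 1) 0 := by
        intro hm
        rw [show ((pos % C : Nat) : Int) - 1 = ((pos % C - 1 : Nat) : Int) by omega,
            tabOf_cell R C flat (pos / C) (pos % C - 1) hr (by omega),
            show (pos / C) * C + (pos % C - 1) = pos - 1 by omega,
            pvPad_getD_lt _ _ _ (by omega)]
      have hcell2 : 0 < pos / C →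
          pvCell (tabOf R C flat) (((pos / C : Nat) : Int) - 1) ((pos % C : Nat) : Int)
            = flat.getD (pos - C) 0 := by
        intro hd
        have hCle : C ≤ pos := by
          by_contra hcon
          rw [Nat.div_eq_of_lt (by omega)] at hd
          omega
        have hmul : (pos / C - 1) * C = (pos / C) * C - C := Nat.sub_one_mul _ _
        have hCmul : C ≤ (pos / C) * C := by
          simpa using Nat.mul_le_mul_right C (show 1 ≤ pos / C by omega)
        rw [show ((pos / C : Nat) : Int) - 1 = ((pos / C - 1 : Nat) : Int) by omega,
            tabOf_cell R C flat (pos / C - 1) (pos % C) (by omega) hc,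
            show (pos / C - 1) * C + pos % C = pos - C by omega,
            pvPad_getD_lt _ _ _ (by omega)]
      have hloA : (if ((pos / C : Nat) : Int) > 0 then
            max (if ((pos % C : Nat) : Int) > 0 then
                   pvCell (tabOf R C flat) ((pos / C : Nat) : Int) (((pos % C : Nat) : Int) - 1)
                 else 1)
              (pvCell (tabOf R C flat) (((pos / C : Nat) : Int) - 1) ((pos % C : Nat) : Int) + 1)
          else if ((pos % C : Nat) : Int) > 0 then
            pvCell (tabOf R C flat) ((pos / C : Nat) : Int) (((pos % C : Nat) : Int) - 1)
          else 1) = pvLo C pos flat := by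
        unfold pvLo
        by_cases hd : 0 < pos / C
        · rw [if_pos (by exact_mod_cast hd), if_pos hd, hcell2 hd]
          by_cases hm : 0 < pos % C
          · rw [if_pos (by exact_mod_cast hm), if_pos hm, hcell1 hm]
          · rw [if_neg (by omega), if_neg hm]
        · rw [if_neg (by omega), if_neg hd]
          by_cases hm : 0 < pos % C
          · rw [if_pos (by exact_mod_cast hm), if_pos hm, hcell1 hm]
          · rw [if_neg (by omega), if_neg hm]
      rw [hloA]
      have h1lo : 1 ≤ pvLo C pos flat := pvLo_ge_one C pos flat hC hflen hflat
      by_cases hm1 : pvLo C pos flat ≤ (m : Int) + 1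
      · rw [PySem.List.pyRange_one_append 1 (pvLo C pos flat) ((m : Int) + 1) h1lo hm1,
            List.foldl_append,
            foldl_ite_skip
              (fun v => 0 < PySem.List.pyGetD (0 :: cs) v 0 ∧ pvLo C pos flat ≤ v) _
              (PySem.List.pyRange 1 (pvLo C pos flat) 1) res
              (by
                intro v hv
                obtain ⟨-, hvlt⟩ := (PySem.List.mem_pyRange_one).1 hv
                rintro ⟨-, hge⟩
                omega)]
        refine Eq.trans (PySem.List.foldl_congr_mem _ _
              (g := fun acc v =>
                if 0 < PySem.List.pyGetD cs (v - 1) 0 then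
                  acc ++ pvDfsB (R : Int) (C : Int) m
                    (PySem.List.pyRange ((pos : Int) + 1) ((R * C : Nat) : Int) 1)
                    (flat ++ [v], cs.set (v - 1).toNat (PySem.List.pyGetD cs (v - 1) 0 - 1))
                else acc) res ?_) ?_
        · intro acc v hv
          simp only []
          obtain ⟨hlov, hvm⟩ := (PySem.List.mem_pyRange_one).1 hv
          have hv1 : (1 : Int) ≤ v := le_trans h1lo hlov
          have hvt : v.toNat = (v - 1).toNat + 1 := by omega
          have hcnt : PySem.List.pyGetD (0 :: cs) v 0 = PySem.List.pyGetD cs (v - 1) 0 := by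
            rw [show v = (((v - 1).toNat + 1 : Nat) : Int) by omega, PySem.List.pyGetD_natCast,
                List.getD_cons_succ,
                show (((v - 1).toNat + 1 : Nat) : Int) - 1 = (((v - 1).toNat : Nat) : Int) by omega,
                PySem.List.pyGetD_natCast]
          have hcell : pvSetCell (tabOf R C flat) ((pos / C : Nat) : Int) ((pos % C : Nat) : Int) v
              = tabOf R C (flat ++ [v]) :=
            tabOf_set R C flat (pos / C) (pos % C) v hr hc (by omega)
          have hset : (0 :: cs).set v.toNat (PySem.List.pyGetD (0 :: cs) v 0 - 1)
              = 0 :: cs.set (v - 1).toNat (PySem.List.pyGetD cs (v - 1) 0 - 1) := by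
            rw [hcnt, hvt]
            rfl
          by_cases hcnd : 0 < PySem.List.pyGetD cs (v - 1) 0
          · rw [if_pos ⟨by rw [hcnt]; exact hcnd, hlov⟩, if_pos hcnd, hcell, hset]
            have hres := ih (pos + 1) (flat ++ [v])
              (cs.set (v - 1).toNat (PySem.List.pyGetD cs (v - 1) 0 - 1)) acc
              (by simp [hflen]) (by omega) (by omega)
              (by
                intro x hx
                rcases List.mem_append.1 hx with h | h
                · exact hflat x h
                · rcases List.mem_singleton.1 h with rfl
                  omega)
            rw [show ((pos + 1 : Nat) : Int) = (pos : Int) + 1 by push_cast; ring] at hres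
            exact hres
          · rw [if_neg (by rintro ⟨h0, -⟩; rw [hcnt] at h0; exact hcnd h0), if_neg hcnd]
        · exact foldl_ite_flatMap
            (fun v => 0 < PySem.List.pyGetD cs (v - 1) 0)
            (fun v => (flat ++ [v], cs.set (v - 1).toNat (PySem.List.pyGetD cs (v - 1) 0 - 1)))
            (pvDfsB (R : Int) (C : Int) m
              (PySem.List.pyRange ((pos : Int) + 1) ((R * C : Nat) : Int) 1))
            (PySem.List.pyRange (pvLo C pos flat) ((m : Int) + 1) 1) res
      · rw [foldl_ite_skip
              (fun v => 0 < PySem.List.pyGetD (0 :: cs) v 0 ∧ pvLo C pos flat ≤ v) _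
              (PySem.List.pyRange 1 ((m : Int) + 1) 1) res
              (by
                intro v hv
                obtain ⟨-, hvlt⟩ := (PySem.List.mem_pyRange_one).1 hv
                rintro ⟨-, hge⟩
                omega),
            PySem.List.pyRange_one_eq_nil
              (show (m : Int) + 1 ≤ pvLo C pos flat by omega)]
        simp
lemma sum_le_toNat_sum (w : List Int) : w.sum ≤ ((w.map Int.toNat).sum : Int) := by
  induction w with
  | nil => simp
  | cons a w ih =>
    simp only [List.sum_cons, List.map_cons]
    rw [Nat.cast_add]
    have h1 : a ≤ (a.toNat : Int) := Int.self_le_toNat a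
    omega

-- A's sorted entries list is the canonical multiset of the count array 0 :: weight
lemma canon_zero_weight (weight : List Int) :
    canonFrom (0 :: weight) 0 (weight.length + 1) = entries_from_weight weight := by
  rw [show weight.length + 1 = 1 + weight.length by omega,
      canonFrom_split (0 :: weight) 0 1 weight.length]
  have h1 : canonFrom (0 :: weight) 0 1 = [] := by
    rw [show (1 : Nat) = 0 + 1 from rfl, canonFrom_succ, canonFrom_zero]
    simp
  rw [h1, List.nil_append, Nat.zero_add,
      canonView weight 0 (0 :: weight)
        (by
          intro j hj
          rw [show 0 + 1 + j = j + 1 by omega, List.getD_cons_succ]),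
      entries_eq_flatMap]
  norm_num

-- the degenerate zero-area shapes: one tableau of empty rows on both sides
lemma fin_nil_eq (s1 s2 : Int) (h : s1 * s2 = 0) :
    List.replicate s1.toNat (List.replicate s2.toNat 0) = pvFin s1 s2 [] := by
  have hslice : ∀ a b : Option Int, PySem.List.slice ([] : List Int) a b = [] := by
    intro a b
    cases a <;> cases b <;> simp [PySem.List.slice]
  rcases mul_eq_zero.1 h with h1 | h2
  · rw [h1]
    unfold pvFin
    rw [PySem.List.pyRange_one_eq_nil (le_refl 0)]
    rfl
  · rw [h2]
    unfold pvFin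
    apply List.ext_getElem
    · simp [PySem.List.length_pyRange_one]
    · intro i hi1 hi2
      rw [List.getElem_replicate, List.getElem_map, hslice]
      simp

-- ===== VERDICT (by name: the statement is the Claim_ definition above) =====
theorem generate_ssyts_spec : Claim_equal_generate_ssyts := by
  intro weight shape _dom hpre
  unfold Spec_generate_ssyts
  simp only [generate_ssyts, generate_ssyts_alt]
  split_ifs with hs
  · rfl
  · have hsum : weight.sum = shape.1 * shape.2 := not_not.1 hs
    by_cases hT0 : shape.1 * shape.2 = 0
    · rw [hT0, pvBtA, if_pos rfl, PySem.List.pyRange_one_eq_nil (le_refl 0)]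
      rw [List.foldl_nil, List.map_cons, List.map_nil, List.nil_append]
      rw [fin_nil_eq shape.1 shape.2 hT0]
    · obtain ⟨h1, h2⟩ := (hpre hsum).resolve_left hT0
      have e1 : shape.1 = (shape.1.toNat : Int) := (Int.toNat_of_nonneg h1).symm
      have e2 : shape.2 = (shape.2.toNat : Int) := (Int.toNat_of_nonneg h2).symm
      set R := shape.1.toNat with hRdef
      set C := shape.2.toNat with hCdef
      have hC : 0 < C := by
        rcases Nat.eq_zero_or_pos C with h | h
        · exact absurd (by rw [e2, h]; simp) hT0
        · exact h
      have hS : (R : Int) * (C : Int) = ((R * C : Nat) : Int) := by push_cast; ring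
      rw [e1, e2, hS]
      have hfuelN : R * C ≤ (weight.map Int.toNat).sum := by
        have hle := sum_le_toNat_sum weight
        rw [hsum, e1, e2, hS] at hle
        exact_mod_cast hle
      have hpair : (entries_from_weight weight).Pairwise (fun a b : Int => a ≤ b) := by
        rw [← canon_zero_weight]
        exact canonFrom_pairwise _ _ _
      rw [PySem.List.sorted_eq_self_of_pairwise (xs := entries_from_weight weight)
            (fun x : Int => x) (by simpa using hpair),
          ← canon_zero_weight, ← tabOf_nil R C]
      have hAB := pvBtA_eq_pvBtB (C : Int) ((R * C : Nat) : Int) weight.length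
        ((weight.map Int.toNat).sum + 1) 0 (tabOf R C []) (0 :: weight) [] (by simp) (by simp)
      rw [hAB]
      have hBF := dfs_eq_bfs R C hC weight.length ((weight.map Int.toNat).sum + 1) 0 [] weight []
        rfl (by omega) (by omega) (by intro x hx; simp at hx)
      simp only [Nat.cast_zero] at hBF
      rw [hBF, bfs_eq (R : Int) (C : Int) weight.length
            (PySem.List.pyRange 0 ((R * C : Nat) : Int) 1) [([], weight)]]
      simp
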